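-- pv_equiv track=rewrite | github.com/rysweet/amplihack | src/amplihack/common/parsing.py | extract_question_text
-- ===== SOURCE A (Python) =====
-- from typing import List, Optional, Tuple
--
-- def extract_question_text(line: str, max_count: int = 10) -> Optional[str]:
--     """Extract question text from potentially numbered line.
--
--     Args:
--         line: Line potentially containing "N. question?" format
--         max_count: Expected max number prefix (for range validation)
--
--     Returns:
--         Extracted question text or None if parsing failed
--     """
--     line = line.strip()
--     if not line:
--         return None
--
--     # Try to remove numbering
--     for i in range(1, max_count + 1):
--         for pattern in [f"{i}. ", f"{i}) "]:
--             if line.startswith(pattern):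
--                 return line.split(" ", 1)[1] if " " in line else None
--
--     return line if "?" in line or line else None
-- ===== SOURCE B (Python) =====
-- from typing import Optional
--
-- def extract_question_text(line: str, max_count: int = 10) -> Optional[str]:
--     """Extract question text from potentially numbered line.
--
--     Single left-to-right scan: read the leading digit run (accumulating its
--     value), then accept the prefix only when it is a valid "N. " / "N) "
--     marker with N in range and no leading zeros.
--     """
--     line = line.strip()
--     if not line:
--         return None
--
--     j = 0
--     n = 0
--     while j < len(line) and line[j].isdigit():
--         n = n * 10 + (ord(line[j]) - 48)
--         j += 1
--
--     if (0 < j and line[0] != "0" and j + 1 < len(line)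
--             and line[j] in ".)" and line[j + 1] == " "
--             and 1 <= n <= max_count):
--         return line[j + 2:]
--     return line
-- ===== Notes on version B (the rewrite author's own statement) =====
-- stated objective: faster
-- what changed: A tries every number i in 1..max_count as two string prefixes ('i. ', 'i) '); B makes one left-to-right scan of the leading digit run (accumulating its value) and then checks separator, no-leading-zero and the 1..max_count range directly.
import Mathlib
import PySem

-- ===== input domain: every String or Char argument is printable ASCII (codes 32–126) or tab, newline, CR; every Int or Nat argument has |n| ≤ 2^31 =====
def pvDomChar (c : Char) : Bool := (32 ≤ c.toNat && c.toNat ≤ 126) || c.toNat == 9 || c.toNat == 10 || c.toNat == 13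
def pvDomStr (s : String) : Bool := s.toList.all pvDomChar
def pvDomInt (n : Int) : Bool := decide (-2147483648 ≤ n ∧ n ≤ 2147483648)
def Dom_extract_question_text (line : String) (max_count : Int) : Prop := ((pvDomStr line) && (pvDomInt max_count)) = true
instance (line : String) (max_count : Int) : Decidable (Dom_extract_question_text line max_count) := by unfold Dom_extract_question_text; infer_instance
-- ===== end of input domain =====

-- B replaces A's loop over all candidate numbers 1..max_count (each tested as two
-- string prefixes) by one left-to-right scan of the leading digit run; same return
-- value everywhere (alternative single-pass algorithm).

-- ===== PORT A =====
-- literal transliteration of A: strip; empty -> None; for i in 1..max_count try the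
-- prefixes "i. " and "i) " (early return = findSome?); else the trailing truthiness return.
-- The inner PySem.List.pyGet? is Python's [1] on the split; its 'none' (IndexError) is
-- unreachable because the branch is guarded by '" " in line'.
def extract_question_text (line : String) (max_count : Int) : Option String :=
  let s := PySem.Str.strip line
  if s = "" then none
  else
    match (PySem.List.pyRange 1 (max_count + 1) 1).findSome? (fun i =>
      [PySem.Int.toStr i ++ ". ", PySem.Int.toStr i ++ ") "].findSome? (fun pat =>
        if PySem.Str.startswith s pat then
          some (if PySem.Str.isIn " " s then
                  PySem.List.pyGet? ((PySem.Str.splitMax? s " " 1).getD []) 1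
                else none)
        else none)) with
    | some r => r
    | none => if PySem.Str.isIn "?" s || !(s = "") then some s else none

-- ===== PORT B =====
-- the while loop of Source B: walk the leading digit run, returning (its length j, its value n)
def pvScan : List Char → Nat → Nat × Nat
  | [], n => (0, n)
  | c :: cs, n =>
    if PySem.Chars.isdigit c then
      let p := pvScan cs (n * 10 + (c.toNat - 48))
      (p.1 + 1, p.2)
    else (0, n)

-- literal transliteration of Source B: strip; empty -> None; one scan of the digit run,
-- then the single range/separator check; line[j+2:] or the stripped line unchanged.
def extract_question_text_alt (line : String) (max_count : Int) : Option String :=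
  let s := PySem.Str.strip line
  if s = "" then none
  else
    let cs := s.toList
    let p := pvScan cs 0
    if 0 < p.1 ∧ cs[0]? ≠ some '0' ∧ p.1 + 1 < cs.length ∧
        (cs[p.1]? = some '.' ∨ cs[p.1]? = some ')') ∧ cs[p.1 + 1]? = some ' ' ∧
        1 ≤ p.2 ∧ (p.2 : Int) ≤ max_count
    then some (String.ofList (cs.drop (p.1 + 2)))
    else some s

-- ===== PRECONDITION & SPEC =====
def Spec_extract_question_text (line : String) (max_count : Int) (out : Option String) : Prop := out = extract_question_text_alt line max_count
instance (line : String) (max_count : Int) (out : Option String) : Decidable (Spec_extract_question_text line max_count out) := by unfold Spec_extract_question_text; infer_instance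

-- ===== CLAIM (what is proved, stated in full; the proofs are below) =====
def Claim_equal_extract_question_text : Prop := ∀ (line : String) (max_count : Int), Dom_extract_question_text line max_count → Spec_extract_question_text line max_count (extract_question_text line max_count)

-- ===== LEMMAS AND PROOFS =====

lemma pv_isdigit_iff (c : Char) : PySem.Chars.isdigit c = true ↔ 48 ≤ c.toNat ∧ c.toNat ≤ 57 := by
  unfold PySem.Chars.isdigit
  rw [Bool.and_eq_true, decide_eq_true_eq, decide_eq_true_eq, Char.le_def, Char.le_def,
    UInt32.le_iff_toNat_le, UInt32.le_iff_toNat_le]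
  exact Iff.rfl

lemma pv_char_eq_of_toNat {a b : Char} (h : a.toNat = b.toNat) : a = b := by
  rw [← Char.ofNat_toNat a, ← Char.ofNat_toNat b, h]

lemma pv_digitChar_toNat (d : Nat) (h : d < 10) : (Nat.digitChar d).toNat = 48 + d := by
  interval_cases d <;> rfl

lemma pv_digitChar_digit (d : Nat) (h : d < 10) : PySem.Chars.isdigit (Nat.digitChar d) = true := by
  rw [pv_isdigit_iff, pv_digitChar_toNat d h]; omega

lemma pv_digitChar_inv (c : Char) (hc : PySem.Chars.isdigit c = true) :
    Nat.digitChar (c.toNat - 48) = c := by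
  rw [pv_isdigit_iff] at hc
  exact pv_char_eq_of_toNat (by rw [pv_digitChar_toNat _ (by omega)]; omega)

-- str(n) for a Nat, defined by the same recursion the proofs use
def pvDigits (n : Nat) : List Char :=
  if n < 10 then [Nat.digitChar n]
  else pvDigits (n / 10) ++ [Nat.digitChar (n % 10)]
decreasing_by exact Nat.div_lt_self (by omega) (by omega)

lemma pv_toDigitsCore_eq : ∀ (n : Nat), ∀ (f : Nat) (ds : List Char), n < f →
    Nat.toDigitsCore 10 f n ds = pvDigits n ++ ds := by
  intro n
  induction n using Nat.strong_induction_on with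
  | _ n ih =>
    intro f ds hf
    match f with
    | 0 => omega
    | f + 1 =>
      rw [Nat.toDigitsCore]
      by_cases h10 : n < 10
      · have : n / 10 = 0 := Nat.div_eq_of_lt h10
        simp only [this]
        rw [pvDigits, if_pos h10, Nat.mod_eq_of_lt h10]
        rfl
      · have hne : ¬ n / 10 = 0 := by
          intro h; have := Nat.div_eq_of_lt (by omega : n < 10); omega
        simp only [if_neg hne]
        rw [ih (n / 10) (Nat.div_lt_self (by omega) (by omega)) f _ (by
          have := Nat.div_lt_self (show 0 < n by omega) (show 1 < 10 by omega); omega)]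
        conv_rhs => rw [pvDigits, if_neg h10]
        simp

lemma pv_toChars_eq (n : Nat) : PySem.Int.toChars (n : Int) = pvDigits n := by
  unfold PySem.Int.toChars
  rw [if_neg (by omega)]
  rw [Nat.toDigits, Int.toNat_natCast, pv_toDigitsCore_eq n (n + 1) [] (by omega), List.append_nil]

lemma pv_pvDigits_ne_nil (n : Nat) : pvDigits n ≠ [] := by
  rw [pvDigits]; split <;> simp

lemma pv_pvDigits_digits (n : Nat) : ∀ c ∈ pvDigits n, PySem.Chars.isdigit c = true := by
  induction n using pvDigits.induct with
  | case1 n h =>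
    rw [pvDigits, if_pos h]
    intro c hc; simp at hc; subst hc; exact pv_digitChar_digit n h
  | case2 n h ih =>
    rw [pvDigits, if_neg h]
    intro c hc
    rcases List.mem_append.1 hc with h1 | h1
    · exact ih c h1
    · simp at h1; subst h1; exact pv_digitChar_digit _ (Nat.mod_lt _ (by omega))

lemma pv_pvDigits_head (n : Nat) (hn : 1 ≤ n) : (pvDigits n).head? ≠ some '0' := by
  induction n using pvDigits.induct with
  | case1 n h =>
    rw [pvDigits, if_pos h]
    simp only [List.head?_cons, ne_eq, Option.some.injEq]
    intro hc
    have := congrArg Char.toNat hc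
    rw [pv_digitChar_toNat n h] at this
    simp [Char.toNat] at this; omega
  | case2 n h ih =>
    rw [pvDigits, if_neg h]
    rw [List.head?_append_of_ne_nil _ (pv_pvDigits_ne_nil _)]
    exact ih (by omega)

def pvVal (a : Nat) (ds : List Char) : Nat := ds.foldl (fun a c => a * 10 + (c.toNat - 48)) a

lemma pv_val_append (a : Nat) (xs : List Char) (y : Char) :
    pvVal a (xs ++ [y]) = (pvVal a xs) * 10 + (y.toNat - 48) := by
  unfold pvVal; rw [List.foldl_append]; rfl

lemma pv_val_pvDigits (a n : Nat) : pvVal a (pvDigits n) = a * 10 ^ (pvDigits n).length + n := by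
  induction n using pvDigits.induct generalizing a with
  | case1 n h =>
    rw [pvDigits, if_pos h]
    unfold pvVal
    simp [List.foldl, pv_digitChar_toNat n h]
  | case2 n h ih =>
    rw [pvDigits, if_neg h]
    rw [pv_val_append, ih a, List.length_append, List.length_singleton, pow_succ,
      pv_digitChar_toNat _ (Nat.mod_lt _ (by omega))]
    have h2 : n / 10 * 10 + n % 10 = n := by omega
    generalize 10 ^ (pvDigits (n / 10)).length = k
    ring_nf
    omega

lemma pv_le_val (ds : List Char) (a : Nat) : a ≤ pvVal a ds := by
  induction ds generalizing a with
  | nil => exact le_refl a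
  | cons c t ih =>
    calc a ≤ a * 10 + (c.toNat - 48) := by omega
    _ ≤ pvVal (a * 10 + (c.toNat - 48)) t := ih _
    _ = pvVal a (c :: t) := rfl

lemma pv_val_pos (c : Char) (t : List Char) (hc : PySem.Chars.isdigit c = true)
    (h0 : c ≠ '0') : 1 ≤ pvVal 0 (c :: t) := by
  have hbnd := (pv_isdigit_iff c).1 hc
  have hne : c.toNat ≠ 48 := by
    intro h; exact h0 (pv_char_eq_of_toNat (by rw [h]; rfl))
  calc 1 ≤ 0 * 10 + (c.toNat - 48) := by omega
  _ ≤ pvVal (0 * 10 + (c.toNat - 48)) t := pv_le_val t _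
  _ = pvVal 0 (c :: t) := rfl

lemma pv_digits_of_val : ∀ (ds : List Char), (∀ c ∈ ds, PySem.Chars.isdigit c = true) →
    ds.head? ≠ some '0' → ds ≠ [] → pvDigits (pvVal 0 ds) = ds := by
  intro ds
  induction ds using List.reverseRecOn with
  | nil => intro _ _ h; exact absurd rfl h
  | append_singleton xs y ih =>
    intro hdig hhead _
    have hy : PySem.Chars.isdigit y = true := hdig y (by simp)
    have hybnd := (pv_isdigit_iff y).1 hy
    match hxs : xs with
    | [] =>
      have h0 : y ≠ '0' := by
        intro h; subst h; simp at hhead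
      have hne : y.toNat ≠ 48 := by
        intro h; exact h0 (pv_char_eq_of_toNat (by rw [h]; rfl))
      simp only [List.nil_append]
      have hv : pvVal 0 [y] = y.toNat - 48 := by simp [pvVal]
      rw [hv, pvDigits, if_pos (by omega), pv_digitChar_inv y hy]
    | c :: t =>
      have hhead' : (c :: t).head? ≠ some '0' := by
        rw [List.head?_append_of_ne_nil _ (by simp : (c :: t) ≠ [])] at hhead
        exact hhead
      have hdig' : ∀ x ∈ c :: t, PySem.Chars.isdigit x = true := by
        intro x hx; exact hdig x (List.mem_append_left _ hx)
      have hm : 1 ≤ pvVal 0 (c :: t) := by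
        apply pv_val_pos c t (hdig' c (by simp))
        intro h; subst h; simp at hhead'
      rw [pv_val_append]
      have hN : (pvVal 0 (c :: t) * 10 + (y.toNat - 48)) ≥ 10 := by omega
      rw [pvDigits, if_neg (by omega)]
      have hdiv : (pvVal 0 (c :: t) * 10 + (y.toNat - 48)) / 10 = pvVal 0 (c :: t) := by omega
      have hmod : (pvVal 0 (c :: t) * 10 + (y.toNat - 48)) % 10 = y.toNat - 48 := by omega
      rw [hdiv, hmod, ih hdig' hhead' (by simp), pv_digitChar_inv y hy]

lemma pv_scan_eq : ∀ (cs : List Char) (a : Nat),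
    pvScan cs a = ((cs.takeWhile PySem.Chars.isdigit).length,
      pvVal a (cs.takeWhile PySem.Chars.isdigit)) := by
  intro cs
  induction cs with
  | nil => intro a; simp [pvScan, pvVal]
  | cons c t ih =>
    intro a
    by_cases hc : PySem.Chars.isdigit c = true
    · rw [pvScan, if_pos hc, ih, List.takeWhile_cons_of_pos hc]
      rfl
    · rw [pvScan, if_neg hc, List.takeWhile_cons_of_neg hc]
      simp [pvVal]

lemma pv_takeWhile_run (D : List Char) (x : Char) (t : List Char)
    (hD : ∀ c ∈ D, PySem.Chars.isdigit c = true) (hx : PySem.Chars.isdigit x = false) :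
    (D ++ x :: t).takeWhile PySem.Chars.isdigit = D := by
  induction D with
  | nil => simpa [List.takeWhile_cons] using hx
  | cons c D' ih =>
    rw [List.cons_append, List.takeWhile_cons_of_pos (hD c (by simp)),
      ih (fun c hc => hD c (List.mem_cons_of_mem _ hc))]

lemma pv_go_zero (sep : List Char) (fuel : Nat) (l cur : List Char) (acc : List (List Char)) :
    PySem.Chars.splitOnMax.go sep fuel 0 l cur acc = ((cur.reverse ++ l) :: acc).reverse := by
  cases fuel <;> cases l <;> simp [PySem.Chars.splitOnMax.go]

lemma pv_go_one : ∀ (pre : List Char) (rest : List Char) (fuel : Nat) (cur : List Char)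
    (acc : List (List Char)), (∀ c ∈ pre, c ≠ ' ') → pre.length < fuel →
    PySem.Chars.splitOnMax.go [' '] fuel 1 (pre ++ ' ' :: rest) cur acc =
      acc.reverse ++ [cur.reverse ++ pre, rest] := by
  intro pre
  induction pre with
  | nil =>
    intro rest fuel cur acc _ hf
    obtain ⟨f, rfl⟩ : ∃ f, fuel = f + 1 := ⟨fuel - 1, by omega⟩
    rw [List.nil_append, PySem.Chars.splitOnMax.go]
    simp only [if_neg (by omega : ¬ (1 : Nat) = 0)]
    rw [if_pos (by simp [List.isPrefixOf])]
    simp only [List.length_singleton, List.drop_succ_cons, List.drop_zero]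
    rw [pv_go_zero]
    simp
  | cons c pre' ih =>
    intro rest fuel cur acc hsp hf
    obtain ⟨f, rfl⟩ : ∃ f, fuel = f + 1 := ⟨fuel - 1, by omega⟩
    have hc : c ≠ ' ' := hsp c (by simp)
    rw [List.cons_append, PySem.Chars.splitOnMax.go]
    simp only [if_neg (by omega : ¬ (1 : Nat) = 0)]
    rw [if_neg (by simp [List.isPrefixOf, Ne.symm hc])]
    rw [ih rest f (c :: cur) acc (fun x hx => hsp x (List.mem_cons_of_mem _ hx)) (by simp at hf ⊢; omega)]
    simp

lemma pv_split_space (pre rest : List Char) (h : ∀ c ∈ pre, c ≠ ' ') :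
    PySem.Chars.splitOnMax (pre ++ ' ' :: rest) [' '] 1 = [pre, rest] := by
  rw [PySem.Chars.splitOnMax, if_neg (by omega)]
  have := pv_go_one pre rest ((pre ++ ' ' :: rest).length + 1) [] [] h (by simp)
  simpa using this

lemma pv_findSome?_pair_const {α γ β : Type} (l : List α) (q r : α → γ) (p : γ → Bool) (v : β) :
    l.findSome? (fun i => [q i, r i].findSome? (fun x => if p x then some v else none)) =
      if l.any (fun i => p (q i) || p (r i)) then some v else none := by
  induction l with
  | nil => rfl
  | cons x t ih =>
    by_cases hq : p (q x) = true
    · simp [List.findSome?_cons, hq]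
    · by_cases hr : p (r x) = true
      · simp [List.findSome?_cons, hq, hr]
      · have hq' : p (q x) = false := by rwa [Bool.not_eq_true] at hq
        have hr' : p (r x) = false := by rwa [Bool.not_eq_true] at hr
        rw [List.findSome?_cons]
        have hx : ([q x, r x].findSome? (fun y => if p y then some v else none)) = none := by
          simp [hq', hr']
        rw [hx, ih]
        simp only [List.any_cons, hq', hr', Bool.false_or]

lemma pv_pat_dot (i : Int) : (PySem.Int.toStr i ++ ". ").toList = PySem.Int.toChars i ++ ['.', ' '] := by
  rw [String.toList_append, PySem.Int.toList_toStr]; rfl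

lemma pv_pat_paren (i : Int) : (PySem.Int.toStr i ++ ") ").toList = PySem.Int.toChars i ++ [')', ' '] := by
  rw [String.toList_append, PySem.Int.toList_toStr]; rfl

lemma pv_prefix_decomp (cs : List Char) (m : Nat) (sep : Char)
    (hsepd : PySem.Chars.isdigit sep = false)
    (hpre : PySem.Chars.startswith cs (PySem.Int.toChars (m : Int) ++ [sep, ' ']) = true) :
    ∃ t, cs = pvDigits m ++ sep :: ' ' :: t ∧ pvScan cs 0 = ((pvDigits m).length, m) := by
  rw [PySem.Chars.startswith, List.isPrefixOf_iff_prefix] at hpre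
  obtain ⟨t, ht⟩ := hpre
  rw [pv_toChars_eq] at ht
  have hcs : cs = pvDigits m ++ sep :: ' ' :: t := by rw [← ht]; simp
  refine ⟨t, hcs, ?_⟩
  rw [hcs, pv_scan_eq, pv_takeWhile_run _ _ _ (pv_pvDigits_digits m) hsepd]
  have hv : pvVal 0 (pvDigits m) = m := by simpa using pv_val_pvDigits 0 m
  rw [hv]

lemma pv_cond_decomp (cs : List Char)
    (h1 : 0 < (pvScan cs 0).1) (h2 : cs[0]? ≠ some '0')
    (h4 : cs[(pvScan cs 0).1]? = some '.' ∨ cs[(pvScan cs 0).1]? = some ')')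
    (h5 : cs[(pvScan cs 0).1 + 1]? = some ' ') :
    ∃ sep t, (sep = '.' ∨ sep = ')') ∧
      cs = pvDigits (pvScan cs 0).2 ++ sep :: ' ' :: t ∧
      (pvScan cs 0).1 = (pvDigits (pvScan cs 0).2).length := by
  have hscan := pv_scan_eq cs 0
  set T := cs.takeWhile PySem.Chars.isdigit with hT
  set R := cs.dropWhile PySem.Chars.isdigit with hRdef
  have hj : (pvScan cs 0).1 = T.length := by rw [hscan]
  have hn : (pvScan cs 0).2 = pvVal 0 T := by rw [hscan]
  have hcs : cs = T ++ R := List.takeWhile_append_dropWhile.symm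
  have hTpos : 0 < T.length := by rw [← hj]; exact h1
  rw [hj] at h4 h5
  rw [hcs] at h2 h4 h5
  rw [List.getElem?_append_right (le_refl T.length)] at h4
  simp only [Nat.sub_self] at h4
  rw [List.getElem?_append_right (by omega : T.length ≤ T.length + 1)] at h5
  have hone : T.length + 1 - T.length = 1 := by omega
  rw [hone] at h5
  rw [List.getElem?_append_left hTpos] at h2
  cases hRc : R with
  | nil => rw [hRc] at h4; simp at h4
  | cons sep R1 =>
    rw [hRc] at h4 h5
    simp only [List.getElem?_cons_zero, Option.some.injEq] at h4
    cases hR1c : R1 with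
    | nil => rw [hR1c] at h5; simp at h5
    | cons x t =>
      rw [hR1c] at h5
      simp only [List.getElem?_cons_succ, List.getElem?_cons_zero, Option.some.injEq] at h5
      subst h5
      have hhead : T.head? ≠ some '0' := by
        rw [List.head?_eq_getElem?]; exact h2
      have hTne : T ≠ [] := by
        intro hcon; rw [hcon] at hTpos; simp at hTpos
      have hdigs : pvDigits (pvScan cs 0).2 = T := by
        rw [hn]
        exact pv_digits_of_val _ (fun c hc => List.mem_takeWhile_imp hc) hhead hTne
      refine ⟨sep, t, ?_, ?_, ?_⟩
      · rcases h4 with h | h <;> [left; right] <;> exact h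
      · rw [hdigs, hcs, hRc, hR1c]
      · rw [hdigs, hj]

lemma pv_isdigit_dot : PySem.Chars.isdigit '.' = false := by decide
lemma pv_isdigit_paren : PySem.Chars.isdigit ')' = false := by decide

lemma pv_forward (s : String) (max_count : Int)
    (h : (PySem.List.pyRange 1 (max_count + 1) 1).any (fun i =>
        PySem.Str.startswith s (PySem.Int.toStr i ++ ". ") ||
        PySem.Str.startswith s (PySem.Int.toStr i ++ ") ")) = true) :
    0 < (pvScan s.toList 0).1 ∧ s.toList[0]? ≠ some '0' ∧
      (pvScan s.toList 0).1 + 1 < s.toList.length ∧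
      (s.toList[(pvScan s.toList 0).1]? = some '.' ∨ s.toList[(pvScan s.toList 0).1]? = some ')') ∧
      s.toList[(pvScan s.toList 0).1 + 1]? = some ' ' ∧
      1 ≤ (pvScan s.toList 0).2 ∧ ((pvScan s.toList 0).2 : Int) ≤ max_count := by
  rw [List.any_eq_true] at h
  obtain ⟨i, hi, hsw⟩ := h
  rw [PySem.List.mem_pyRange_one] at hi
  have hm : i = ((i.toNat : Nat) : Int) := by omega
  have hm1 : 1 ≤ i.toNat := by omega
  have key : ∃ sep t, (sep = '.' ∨ sep = ')') ∧
      s.toList = pvDigits i.toNat ++ sep :: ' ' :: t ∧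
      pvScan s.toList 0 = ((pvDigits i.toNat).length, i.toNat) := by
    rw [Bool.or_eq_true] at hsw
    rcases hsw with hsw | hsw
    · rw [PySem.Str.startswith, pv_pat_dot, hm] at hsw
      obtain ⟨t, h1, h2⟩ := pv_prefix_decomp s.toList i.toNat '.' pv_isdigit_dot hsw
      exact ⟨'.', t, Or.inl rfl, h1, h2⟩
    · rw [PySem.Str.startswith, pv_pat_paren, hm] at hsw
      obtain ⟨t, h1, h2⟩ := pv_prefix_decomp s.toList i.toNat ')' pv_isdigit_paren hsw
      exact ⟨')', t, Or.inr rfl, h1, h2⟩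
  obtain ⟨sep, t, hsep, hcs, hscan⟩ := key
  have hDne : pvDigits i.toNat ≠ [] := pv_pvDigits_ne_nil _
  have hDpos : 0 < (pvDigits i.toNat).length := List.length_pos_iff.2 hDne
  refine ⟨?_, ?_, ?_, ?_, ?_, ?_, ?_⟩
  · rw [hscan]; exact hDpos
  · rw [hcs, List.getElem?_append_left hDpos, ← List.head?_eq_getElem?]
    exact pv_pvDigits_head i.toNat hm1
  · rw [hscan, hcs]; simp
  · rw [hscan, hcs]
    simp only [List.getElem?_append_right (le_refl _), Nat.sub_self, List.getElem?_cons_zero]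
    rcases hsep with h | h <;> [left; right] <;> rw [h]
  · rw [hscan, hcs]
    rw [List.getElem?_append_right (by omega)]
    simp
  · rw [hscan]; exact hm1
  · rw [hscan]; omega

lemma pv_backward (s : String) (max_count : Int)
    (h1 : 0 < (pvScan s.toList 0).1) (h2 : s.toList[0]? ≠ some '0')
    (h4 : s.toList[(pvScan s.toList 0).1]? = some '.' ∨ s.toList[(pvScan s.toList 0).1]? = some ')')
    (h5 : s.toList[(pvScan s.toList 0).1 + 1]? = some ' ')
    (h6 : 1 ≤ (pvScan s.toList 0).2) (h7 : ((pvScan s.toList 0).2 : Int) ≤ max_count) :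
    (PySem.List.pyRange 1 (max_count + 1) 1).any (fun i =>
        PySem.Str.startswith s (PySem.Int.toStr i ++ ". ") ||
        PySem.Str.startswith s (PySem.Int.toStr i ++ ") ")) = true := by
  obtain ⟨sep, t, hsep, hcs, hj⟩ := pv_cond_decomp s.toList h1 h2 h4 h5
  set D := pvDigits (pvScan s.toList 0).2 with hDdef
  rw [List.any_eq_true]
  refine ⟨((pvScan s.toList 0).2 : Int), ?_, ?_⟩
  · rw [PySem.List.mem_pyRange_one]
    constructor
    · exact_mod_cast h6
    · omega
  · rw [Bool.or_eq_true]
    have hpre : PySem.Chars.startswith s.toList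
        (PySem.Int.toChars ((pvScan s.toList 0).2 : Int) ++ [sep, ' ']) = true := by
      rw [PySem.Chars.startswith, List.isPrefixOf_iff_prefix, pv_toChars_eq, ← hDdef]
      refine ⟨t, ?_⟩
      rw [hcs]; simp
    rcases hsep with h | h
    · left; rw [PySem.Str.startswith, pv_pat_dot, ← h]; exact hpre
    · right; rw [PySem.Str.startswith, pv_pat_paren, ← h]; exact hpre

lemma pv_value (s : String)
    (h1 : 0 < (pvScan s.toList 0).1) (h2 : s.toList[0]? ≠ some '0')
    (h4 : s.toList[(pvScan s.toList 0).1]? = some '.' ∨ s.toList[(pvScan s.toList 0).1]? = some ')')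
    (h5 : s.toList[(pvScan s.toList 0).1 + 1]? = some ' ') :
    (if PySem.Str.isIn " " s then
        PySem.List.pyGet? ((PySem.Str.splitMax? s " " 1).getD []) 1
      else none)
      = some (String.ofList (s.toList.drop ((pvScan s.toList 0).1 + 2))) := by
  obtain ⟨sep, t, hsep, hcs, hj⟩ := pv_cond_decomp s.toList h1 h2 h4 h5
  set D := pvDigits (pvScan s.toList 0).2 with hDdef
  have hD : ∀ c ∈ D, PySem.Chars.isdigit c = true := by
    rw [hDdef]; exact pv_pvDigits_digits _
  have hnosp : ∀ c ∈ D ++ [sep], c ≠ ' ' := by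
    intro c hc hcsp
    subst hcsp
    rcases List.mem_append.1 hc with h | h
    · have := hD _ h; simp [PySem.Chars.isdigit] at this
    · simp at h; rcases hsep with hs' | hs' <;> rw [hs'] at h <;> simp at h
  have hcs' : s.toList = (D ++ [sep]) ++ ' ' :: t := by
    rw [hcs]; simp
  have hin : PySem.Str.isIn " " s = true := by
    rw [PySem.Str.isIn, show (" ").toList = [' '] from rfl]
    rw [PySem.Chars.isIn_iff_infix]
    refine ⟨D ++ [sep], t, ?_⟩
    rw [hcs']; simp
  rw [if_pos hin]
  have hsplit : PySem.Str.splitMax? s " " 1 =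
      some [String.ofList (D ++ [sep]), String.ofList t] := by
    rw [PySem.Str.splitMax?, PySem.Chars.splitMax?]
    rw [if_neg (by rw [show (" ").toList = [' '] from rfl]; simp)]
    rw [show (" ").toList = [' '] from rfl]
    rw [hcs', pv_split_space _ _ hnosp]
    rfl
  rw [hsplit]
  have hdrop : s.toList.drop ((pvScan s.toList 0).1 + 2) = t := by
    rw [hj, hcs']
    rw [show (D ++ [sep]) ++ ' ' :: t = ((D ++ [sep]) ++ [' ']) ++ t by simp]
    rw [show D.length + 2 = ((D ++ [sep]) ++ [' ']).length by simp]
    exact List.drop_left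
  rw [hdrop]
  rfl

-- ===== VERDICT (by name: the statement is the Claim_ definition above) =====
theorem extract_question_text_spec : Claim_equal_extract_question_text := by
  intro line max_count _
  unfold Spec_extract_question_text extract_question_text extract_question_text_alt
  by_cases hs : PySem.Str.strip line = ""
  · simp [hs]
  · simp only [if_neg hs]
    set s := PySem.Str.strip line with hsdef
    rw [pv_findSome?_pair_const (PySem.List.pyRange 1 (max_count + 1) 1)
        (fun i => PySem.Int.toStr i ++ ". ") (fun i => PySem.Int.toStr i ++ ") ")
        (fun pat => PySem.Str.startswith s pat)
        (if PySem.Str.isIn " " s then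
            PySem.List.pyGet? ((PySem.Str.splitMax? s " " 1).getD []) 1
          else none)]
    by_cases hC : 0 < (pvScan s.toList 0).1 ∧ s.toList[0]? ≠ some '0' ∧
        (pvScan s.toList 0).1 + 1 < s.toList.length ∧
        (s.toList[(pvScan s.toList 0).1]? = some '.' ∨ s.toList[(pvScan s.toList 0).1]? = some ')') ∧
        s.toList[(pvScan s.toList 0).1 + 1]? = some ' ' ∧
        1 ≤ (pvScan s.toList 0).2 ∧ ((pvScan s.toList 0).2 : Int) ≤ max_count
    · obtain ⟨h1, h2, h3, h4, h5, h6, h7⟩ := id hC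
      rw [if_pos (pv_backward s max_count h1 h2 h4 h5 h6 h7)]
      conv_rhs => rw [if_pos hC]
      exact pv_value s h1 h2 h4 h5
    · rw [if_neg (fun hany => hC (pv_forward s max_count hany))]
      conv_rhs => rw [if_neg hC]
      exact if_pos (by rw [decide_eq_false hs]; simp)
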